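-- pv_equiv track=rewrite | github.com/Qingluan/Mroylib-min | build/lib/qlib/text/parser.py | extract_fuzzy_regex
-- ===== SOURCE A (Python) =====
-- import re, itertools
-- from string import digits, ascii_letters ,punctuation, whitespace
--
-- def extract_fuzzy_regex(string):
--     res = ''
--     res_k = []
--     last = ''
--     last_k = 0
--     words_re = r'[\s\w\-\_\.\'\"]'
--     for k, group in itertools.groupby(string):
--         if k in ascii_letters + digits + "-_ '\"\." :
--             l, k = words_re, len(list(group))
--             if l == last:
--                 last_k += k
--             else:
--                 # res.append([last, last_k])
--                 res_k.append(last_k)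
--                 if last == words_re:
--                     res +=  "(%s+)" % last
--                 else:
--                     res += last + "+?"
--                 last_k = k
--                 last = l
--
--         elif k in punctuation:
--             l, k = r'\%s' % k , len(list(group))
--             if l == last:
--                 last_k += k
--             else:
--                 # res.append([last, last_k])
--                 res_k.append(last_k)
--                 if last == words_re:
--                     res +=  "(%s+)" % last
--                 else:
--                     res += last + "+?"
--                 last_k = k
--                 last = l
--
--
--         else:
--             l, k = '.', len(list(group))
--             if l == last:
--                 last_k += k
--             else:
--                 # res.append([last, last_k])
--                 res_k.append(last_k)
--                 if last == words_re:
--                     res +=  "(%s+)" % last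
--                 else:
--                     res += last + "+?"
--                 last_k = k
--                 last = l
--
--     # res.append([last, last_k])
--     if last == words_re:
--         res +=  "(%s+)" % last
--     else:
--         res += last + "+?"
--     return res[2:], res_k[1:]
-- ===== SOURCE B (Python) =====
-- import itertools
-- from string import digits, ascii_letters, punctuation
--
-- _WORDS_RE = r'[\s\w\-\_\.\'\"]'
-- _WORD_CHARS = ascii_letters + digits + "-_ '\"\."
--
-- def _label(c):
--     if c in _WORD_CHARS:
--         return _WORDS_RE
--     if c in punctuation:
--         return '\\' + c
--     return '.'
--
-- def extract_fuzzy_regex(string):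
--     runs = [(lab, sum(1 for _ in g))
--             for lab, g in itertools.groupby(string, key=_label)]
--     regex = ''.join('(%s+)' % lab if lab == _WORDS_RE else lab + '+?'
--                     for lab, _ in runs)
--     counts = [cnt for _, cnt in runs[:-1]]
--     return regex, counts
-- ===== Notes on version B (the rewrite author's own statement) =====
-- stated objective: simpler
-- what changed: Replaces A's sentinel/delayed-emit state machine (mutable res/res_k/last/last_k with a dummy first emission sliced off by res[2:] and res_k[1:]) with a label(c) helper, one groupby(key=label) pass building an explicit runs table, then a direct join for the regex and runs[:-1] for the counts.
import Mathlib
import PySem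

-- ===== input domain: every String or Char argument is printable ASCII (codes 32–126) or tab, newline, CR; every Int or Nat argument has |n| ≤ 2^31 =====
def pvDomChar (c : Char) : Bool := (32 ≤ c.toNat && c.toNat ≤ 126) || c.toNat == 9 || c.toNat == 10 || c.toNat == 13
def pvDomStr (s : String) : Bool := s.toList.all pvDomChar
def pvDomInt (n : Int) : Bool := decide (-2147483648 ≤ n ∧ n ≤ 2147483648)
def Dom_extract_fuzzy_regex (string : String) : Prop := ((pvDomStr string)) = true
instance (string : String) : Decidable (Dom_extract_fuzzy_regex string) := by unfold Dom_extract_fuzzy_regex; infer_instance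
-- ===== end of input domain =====

-- B replaces A's sentinel/delayed-emit state machine by an explicit label-runs table
-- (group by character class, then one join for the regex and one slice for the counts): simpler.
-- Both ports work on code points (List Char) and convert with String.ofList only at the boundary.

-- shared string constants (both Python versions name the same literals)
-- words_re = r'[\s\w\-\_\.\'\"]'
def pvWordsRe : List Char := "[\\s\\w\\-\\_\\.\\'\\\"]".toList
-- ascii_letters + digits + "-_ '\"\."  (the Python literal contains a backslash and a dot)
def pvWordChars : List Char := "abcdefghijklmnopqrstuvwxyzABCDEFGHIJKLMNOPQRSTUVWXYZ0123456789-_ '\"\\.".toList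
-- string.punctuation
def pvPunct : List Char := "!\"#$%&'()*+,-./:;<=>?@[\\]^_`{|}~".toList

-- ===== PORT A =====
-- itertools.groupby(string): runs of equal consecutive characters with their lengths
def pyGroupby : List Char → List (Char × Int)
  | [] => []
  | c :: cs =>
    match pyGroupby cs with
    | (k, n) :: rest => if c == k then (c, n + 1) :: rest else (c, 1) :: (k, n) :: rest
    | [] => [(c, 1)]

-- A's loop body: state (res, res_k, last, last_k); the three branches transliterated
def pyA_step (st : List Char × List Int × List Char × Int) (p : Char × Int) :
    List Char × List Int × List Char × Int :=
  match st with
  | (res, res_k, last, last_k) =>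
    if pvWordChars.contains p.1 then
      let l := pvWordsRe
      if l == last then (res, res_k, last, last_k + p.2)
      else ((if last == pvWordsRe then res ++ '(' :: last ++ ['+', ')'] else res ++ last ++ ['+', '?']),
            res_k ++ [last_k], l, p.2)
    else if pvPunct.contains p.1 then
      let l := ['\\', p.1]
      if l == last then (res, res_k, last, last_k + p.2)
      else ((if last == pvWordsRe then res ++ '(' :: last ++ ['+', ')'] else res ++ last ++ ['+', '?']),
            res_k ++ [last_k], l, p.2)
    else
      let l := ['.']
      if l == last then (res, res_k, last, last_k + p.2)
      else ((if last == pvWordsRe then res ++ '(' :: last ++ ['+', ')'] else res ++ last ++ ['+', '?']),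
            res_k ++ [last_k], l, p.2)

def extract_fuzzy_regex (string : String) : String × List Int :=
  match (pyGroupby string.toList).foldl pyA_step ([], [], [], 0) with
  | (res, res_k, last, _) =>
    let res := if last == pvWordsRe then res ++ '(' :: last ++ ['+', ')'] else res ++ last ++ ['+', '?']
    -- res[2:] and res_k[1:]: slicing from a nonnegative index is drop (exact)
    (String.ofList (res.drop 2), res_k.drop 1)

-- ===== PORT B =====
def bLabel (c : Char) : List Char :=
  if pvWordChars.contains c then pvWordsRe
  else if pvPunct.contains c then ['\\', c]
  else ['.']

def bFmt (l : List Char) : List Char :=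
  if l == pvWordsRe then '(' :: l ++ ['+', ')'] else l ++ ['+', '?']

-- itertools.groupby(string, key=_label): group consecutive equal labels (right-recursive grouping)
def bGroupStep (l : List Char) (n : Int) (C : List (List Char × Int)) : List (List Char × Int) :=
  match C with
  | (l', n') :: rest => if l == l' then (l, n + n') :: rest else (l, n) :: (l', n') :: rest
  | [] => [(l, n)]

def bGroup : List (List Char × Int) → List (List Char × Int)
  | [] => []
  | (l, n) :: xs => bGroupStep l n (bGroup xs)

def bRuns (cs : List Char) : List (List Char × Int) := bGroup (cs.map (fun c => (bLabel c, 1)))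

def extract_fuzzy_regex_alt (string : String) : String × List Int :=
  let runs := bRuns string.toList
  -- ''.join(...) on code points is concatenation (flatten); runs[:-1] is dropLast
  (String.ofList ((runs.map (fun r => bFmt r.1)).flatten), runs.dropLast.map (fun r => r.2))

-- ===== PRECONDITION & SPEC =====
def Spec_extract_fuzzy_regex (string : String) (out : String × List Int) : Prop := out = extract_fuzzy_regex_alt string
instance (string : String) (out : String × List Int) : Decidable (Spec_extract_fuzzy_regex string out) := by unfold Spec_extract_fuzzy_regex; infer_instance

-- ===== CLAIM (what is proved, stated in full; the proofs are below) =====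
def Claim_equal_extract_fuzzy_regex : Prop := ∀ (string : String), Dom_extract_fuzzy_regex string → Spec_extract_fuzzy_regex string (extract_fuzzy_regex string)

-- ===== LEMMAS AND PROOFS =====

-- merged-run step machine (A's loop body seen through the label function)
def mStep (st : List Char × List Int × List Char × Int) (q : List Char × Int) :
    List Char × List Int × List Char × Int :=
  match st with
  | (res, rk, last, lk) =>
    if q.1 == last then (res, rk, last, lk + q.2)
    else (res ++ bFmt last, rk ++ [lk], q.1, q.2)

theorem pyA_step_eq (st : List Char × List Int × List Char × Int) (p : Char × Int) :
    pyA_step st p = mStep st (bLabel p.1, p.2) := by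
  obtain ⟨res, rk, last, lk⟩ := st
  simp only [pyA_step, mStep, bLabel, bFmt]
  split_ifs <;> simp [List.append_assoc]

theorem foldl_pyA_eq (rs : List (Char × Int)) (st : List Char × List Int × List Char × Int) :
    rs.foldl pyA_step st = (rs.map (fun p => (bLabel p.1, p.2))).foldl mStep st := by
  rw [List.foldl_map]
  induction rs generalizing st with
  | nil => rfl
  | cons p rs ih => simp only [List.foldl_cons, pyA_step_eq, ih]

theorem mStep_merge (st : List Char × List Int × List Char × Int) (l : List Char) (n m : Int) :
    mStep (mStep st (l, n)) (l, m) = mStep st (l, n + m) := by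
  obtain ⟨res, rk, last, lk⟩ := st
  by_cases h : l = last
  · subst h; simp [mStep, add_assoc]
  · have hb : (l == last) = false := by simpa using h
    simp [mStep, hb]

theorem foldl_mStep_bGroup (ls : List (List Char × Int)) (st : List Char × List Int × List Char × Int) :
    ls.foldl mStep st = (bGroup ls).foldl mStep st := by
  induction ls generalizing st with
  | nil => rfl
  | cons x xs ih =>
    obtain ⟨l, n⟩ := x
    simp only [List.foldl_cons, bGroup]
    rw [ih]
    rcases hC : bGroup xs with _ | ⟨⟨l', n'⟩, r⟩
    · rfl
    · by_cases h : l = l'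
      · subst h
        simp [bGroupStep, List.foldl_cons, mStep_merge]
      · have hb : (l == l') = false := by simpa using h
        simp [bGroupStep, hb, List.foldl_cons]

theorem bGroupStep_succ (l : List Char) (n : Int) (C : List (List Char × Int)) :
    bGroupStep l 1 (bGroupStep l n C) = bGroupStep l (n + 1) C := by
  rcases C with _ | ⟨⟨l', n'⟩, r⟩
  · simp [bGroupStep]; ring
  · by_cases h : l = l'
    · subst h; simp [bGroupStep]; ring
    · simp [bGroupStep, h]; ring

theorem pyGroupby_eq_nil (cs : List Char) (h : pyGroupby cs = []) : cs = [] := by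
  cases cs with
  | nil => rfl
  | cons c cs =>
    exfalso
    simp only [pyGroupby] at h
    split at h <;> (try split at h) <;> simp_all

theorem bGroup_pyGroupby (cs : List Char) :
    bGroup ((pyGroupby cs).map (fun p => (bLabel p.1, p.2))) = bRuns cs := by
  induction cs with
  | nil => rfl
  | cons c cs ih =>
    rcases hG : pyGroupby cs with _ | ⟨⟨k, n⟩, rest⟩
    · rw [pyGroupby_eq_nil cs hG]
      rfl
    · rw [hG] at ih
      simp only [pyGroupby, hG]
      have hB : bRuns (c :: cs) = bGroupStep (bLabel c) 1 (bRuns cs) := rfl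
      by_cases hck : c = k
      · subst hck
        simp only [beq_self_eq_true, if_true, List.map_cons, bGroup]
        rw [hB, ← ih]
        simp only [List.map_cons, bGroup]
        exact (bGroupStep_succ _ n _).symm
      · have hb : (c == k) = false := by simpa using hck
        simp only [hb, Bool.false_eq_true, if_false, List.map_cons, bGroup]
        rw [hB, ← ih]
        simp only [List.map_cons, bGroup]

theorem bGroupStep_ne_nil (l : List Char) (n : Int) (C : List (List Char × Int)) :
    bGroupStep l n C ≠ [] := by
  rcases C with _ | ⟨⟨l', n'⟩, r⟩
  · simp [bGroupStep]
  · simp only [bGroupStep]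
    split_ifs <;> simp

theorem bGroup_fst_mem (p : List Char × Int) (ls : List (List Char × Int)) (h : p ∈ bGroup ls) :
    p.1 ∈ ls.map Prod.fst := by
  induction ls with
  | nil => simp [bGroup] at h
  | cons x xs ih =>
    obtain ⟨l, n⟩ := x
    simp only [bGroup] at h
    rcases hC : bGroup xs with _ | ⟨⟨l', n'⟩, r⟩ <;> rw [hC] at h
    · simp [bGroupStep] at h
      simp [h]
    · simp only [bGroupStep] at h
      split_ifs at h with hll
      · rcases List.mem_cons.1 h with h1 | h1
        · subst h1; simp
        · exact List.mem_cons_of_mem _ (ih (hC ▸ List.mem_cons_of_mem _ h1))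
      · rcases List.mem_cons.1 h with h1 | h1
        · subst h1; simp
        · exact List.mem_cons_of_mem _ (ih (hC ▸ h1))

-- adjacency: consecutive runs carry distinct labels
def adjOK : List (List Char × Int) → Prop
  | [] => True
  | [_] => True
  | a :: b :: xs => a.1 ≠ b.1 ∧ adjOK (b :: xs)

theorem adjOK_cons {a : List Char × Int} {xs : List (List Char × Int)} :
    adjOK (a :: xs) ↔ (∀ p ∈ xs.head?, a.1 ≠ p.1) ∧ adjOK xs := by
  cases xs <;> simp [adjOK]

theorem bGroup_adjOK (ls : List (List Char × Int)) : adjOK (bGroup ls) := by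
  induction ls with
  | nil => trivial
  | cons x xs ih =>
    obtain ⟨l, n⟩ := x
    simp only [bGroup]
    rcases hC : bGroup xs with _ | ⟨⟨l', n'⟩, r⟩ <;> rw [hC] at ih
    · simp [bGroupStep, adjOK]
    · by_cases h : l = l'
      · subst h
        simp only [bGroupStep, beq_self_eq_true, if_true]
        rcases adjOK_cons.mp ih with ⟨h1, h2⟩
        exact adjOK_cons.mpr ⟨h1, h2⟩
      · have hb : (l == l') = false := by simpa using h
        simp only [bGroupStep, hb, Bool.false_eq_true, if_false]
        refine adjOK_cons.mpr ⟨?_, ih⟩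
        intro p hp
        simp only [List.head?_cons, Option.mem_def, Option.some.injEq] at hp
        rw [← hp]
        exact h

-- closed form of the merged-run fold when every step emits
theorem foldl_mStep_closed (ms : List (List Char × Int)) :
    ∀ (res : List Char) (rk : List Int) (last : List Char) (lk : Int),
      adjOK ms →
      (∀ p ∈ ms.head?, p.1 ≠ last) →
      (h : ms ≠ []) →
      ms.foldl mStep (res, rk, last, lk) =
        (res ++ bFmt last ++ (ms.dropLast.map (fun r => bFmt r.1)).flatten,
         rk ++ lk :: ms.dropLast.map (fun r => r.2),
         (ms.getLast h).1, (ms.getLast h).2) := by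
  induction ms with
  | nil => intro _ _ _ _ _ _ h; exact absurd rfl h
  | cons q rest ih =>
    intro res rk last lk hch hhd _
    obtain ⟨l, n⟩ := q
    have hll : l ≠ last := by simpa using hhd (l, n) (by simp)
    have hb : ((l : List Char) == last) = false := by simpa using hll
    have hstep : mStep (res, rk, last, lk) (l, n) = (res ++ bFmt last, rk ++ [lk], l, n) := by
      simp [mStep, hb]
    cases rest with
    | nil => simp [List.foldl_cons, hstep]
    | cons q' rest' =>
      have hne : q' :: rest' ≠ [] := by simp
      rcases adjOK_cons.mp hch with ⟨hh, hch'⟩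
      have hhd' : ∀ p ∈ (q' :: rest').head?, p.1 ≠ l := by
        intro p hp
        exact (hh p hp).symm
      rw [List.foldl_cons, hstep, ih _ _ _ _ hch' hhd' hne]
      rw [List.dropLast_cons_of_ne_nil hne, List.getLast_cons hne]
      simp

theorem bRuns_ne_nil (cs : List Char) (h : cs ≠ []) : bRuns cs ≠ [] := by
  cases cs with
  | nil => exact absurd rfl h
  | cons c cs => exact bGroupStep_ne_nil _ _ _

theorem bLabel_ne_nil (c : Char) : bLabel c ≠ [] := by
  unfold bLabel
  split_ifs <;> simp [pvWordsRe]

-- the final delayed emit of A is bFmt of the pending label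
theorem final_emit (res last : List Char) :
    (if last == pvWordsRe then res ++ '(' :: last ++ ['+', ')'] else res ++ last ++ ['+', '?'])
      = res ++ bFmt last := by
  unfold bFmt
  split_ifs <;> simp

-- ===== VERDICT (by name: the statement is the Claim_ definition above) =====
theorem extract_fuzzy_regex_spec : Claim_equal_extract_fuzzy_regex := by
  intro string _
  unfold Spec_extract_fuzzy_regex extract_fuzzy_regex extract_fuzzy_regex_alt
  rcases hcs : string.toList with _ | ⟨c, cs'⟩
  · rfl
  · rw [← hcs]
    have hne : string.toList ≠ [] := by simp [hcs]
    set cs := string.toList with hdef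
    have hruns : bRuns cs ≠ [] := bRuns_ne_nil cs hne
    have hfold : (pyGroupby cs).foldl pyA_step ([], [], [], 0) =
        (bRuns cs).foldl mStep ([], [], [], 0) := by
      rw [foldl_pyA_eq, foldl_mStep_bGroup, bGroup_pyGroupby]
    have hchain : adjOK (bRuns cs) := bGroup_adjOK _
    have hhd : ∀ p ∈ (bRuns cs).head?, p.1 ≠ ([] : List Char) := by
      intro p hp
      have hm : p ∈ bRuns cs := List.mem_of_mem_head? hp
      have := bGroup_fst_mem p _ hm
      rcases List.mem_map.1 (by simpa using this) with ⟨c', _, hc'⟩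
      rw [← hc']
      exact bLabel_ne_nil c'
    rw [hfold, foldl_mStep_closed (bRuns cs) [] [] [] 0 hchain hhd hruns]
    dsimp only
    rw [final_emit]
    have hsplit : ((bRuns cs).map (fun r => bFmt r.1)).flatten =
        ((bRuns cs).dropLast.map (fun r => bFmt r.1)).flatten ++ bFmt ((bRuns cs).getLast hruns).1 := by
      conv_lhs => rw [← List.dropLast_concat_getLast hruns]
      simp
    have hfmtnil : bFmt ([] : List Char) = ['+', '?'] := by decide
    simp only [hfmtnil, List.nil_append, List.append_assoc]
    rw [hsplit]
    simp
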